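-- pv_equiv track=rewrite | github.com/WCRP-CMIP/CMIPLD | cmipld/utils/git/git_repo_metadata.py | _apply_path_filters
-- ===== SOURCE A (Python) =====
-- def _apply_path_filters(files, base_path_filter=None, exclude_paths=None):
--     """Apply base path and exclusion filters to file list."""
--     result = files
--
--     if base_path_filter:
--         if not base_path_filter.endswith('/'):
--             base_path_filter += '/'
--         result = [f for f in result if f.startswith(base_path_filter)]
--
--     if exclude_paths:
--         for exclude_path in exclude_paths:
--             result = [f for f in result if not f.startswith(exclude_path)]
--
--     return result
-- ===== SOURCE B (Python) =====
-- def _apply_path_filters(files, base_path_filter=None, exclude_paths=None):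
--     """Apply base path and exclusion filters to file list.
--
--     Builds a character trie of the exclusion prefixes once; each file is then
--     tested by a single trie walk instead of one startswith scan per exclude path.
--     """
--     bp = None
--     if base_path_filter:
--         bp = base_path_filter if base_path_filter.endswith('/') else base_path_filter + '/'
--
--     # trie: nested dicts keyed by single characters; '' key marks end of a prefix
--     root = {}
--     for e in (exclude_paths or []):
--         node = root
--         for ch in e:
--             node = node.setdefault(ch, {})
--         node[''] = True
--
--     def _excluded(f):
--         node = root
--         if '' in node:
--             return True
--         for ch in f:
--             if ch not in node:
--                 return False
--             node = node[ch]
--             if '' in node: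
--                 return True
--         return False
--
--     out = []
--     for f in files:
--         if bp is not None and not f.startswith(bp):
--             continue
--         if _excluded(f):
--             continue
--         out.append(f)
--     return out
-- ===== Notes on version B (the rewrite author's own statement) =====
-- stated objective: alternative
-- what changed: Replaces A's one filter pass per exclude path (repeated startswith scans over rebuilt lists) with a character trie built once from the exclude prefixes; each file is tested by a single trie walk, plus one inline base-prefix check.
import Mathlib
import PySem

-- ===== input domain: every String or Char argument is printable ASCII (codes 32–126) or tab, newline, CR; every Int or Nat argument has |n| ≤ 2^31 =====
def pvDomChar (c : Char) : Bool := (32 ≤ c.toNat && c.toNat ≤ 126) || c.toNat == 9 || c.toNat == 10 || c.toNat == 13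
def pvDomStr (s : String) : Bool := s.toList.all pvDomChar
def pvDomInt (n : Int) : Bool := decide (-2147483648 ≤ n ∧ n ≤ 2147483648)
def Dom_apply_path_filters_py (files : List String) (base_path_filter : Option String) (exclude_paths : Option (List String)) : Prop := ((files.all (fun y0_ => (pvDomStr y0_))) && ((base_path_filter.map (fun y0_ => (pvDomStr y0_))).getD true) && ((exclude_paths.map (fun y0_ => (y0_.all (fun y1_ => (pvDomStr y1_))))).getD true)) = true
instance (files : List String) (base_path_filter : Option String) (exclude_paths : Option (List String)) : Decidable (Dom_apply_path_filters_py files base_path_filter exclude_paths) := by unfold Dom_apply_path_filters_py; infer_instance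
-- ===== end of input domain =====

-- B replaces A's per-exclude-path filter passes with a character trie of the exclude
-- prefixes built once; each file is tested by a single trie walk (objective: alternative).


-- ===== PORT A =====
-- Literal transliteration of A: optional base-path filter pass, then one filter pass per exclude path.
def apply_path_filters_py (files : List String) (base_path_filter : Option String) (exclude_paths : Option (List String)) : List String :=
  let result := files
  let result :=
    match base_path_filter with
    | none => result
    | some b =>
      if b ≠ "" then
        let b := if PySem.Str.endswith b "/" then b else b ++ "/"
        result.filter (fun f => PySem.Str.startswith f b)
      else result
  match exclude_paths with
  | none => result
  | some l =>
    if l ≠ [] then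
      l.foldl (fun acc e => acc.filter (fun f => !PySem.Str.startswith f e)) result
    else result

-- ===== PORT B =====
-- B: a character trie of the exclude prefixes (Python's nested dicts with '' as terminal
-- marker become the mutual inductive PTrie/PChildren; the children assoc list keeps
-- insertion order like the dict). One walk per file replaces the per-exclude scans.
mutual
inductive PTrie where
  | node : Bool → PChildren → PTrie
inductive PChildren where
  | nil : PChildren
  | cons : Char → PTrie → PChildren → PChildren
end

def childGet : PChildren → Char → Option PTrie
  | .nil, _ => none
  | .cons c t rest, x => if c = x then some t else childGet rest x

-- dict write: overwrite an existing key in place, else append (dict insertion order)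
def childSet : PChildren → Char → PTrie → PChildren
  | .nil, c, t => .cons c t .nil
  | .cons c' t' rest, c, t => if c' = c then .cons c' t rest else .cons c' t' (childSet rest c t)

-- the "node = node.setdefault(ch, {})" walk, then node[''] = True at the end of the word
def trieInsert : PTrie → List Char → PTrie
  | .node _ ch, [] => .node true ch
  | .node b ch, c :: cs =>
      .node b (childSet ch c (trieInsert ((childGet ch c).getD (.node false .nil)) cs))

-- _excluded's walk: terminal check at each node, then descend on the next character
def trieWalk : PTrie → List Char → Bool
  | .node true _, _ => true
  | .node false _, [] => false
  | .node false ch, c :: cs =>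
      match childGet ch c with
      | none => false
      | some t => trieWalk t cs

def apply_path_filters_py_alt (files : List String) (base_path_filter : Option String) (exclude_paths : Option (List String)) : List String :=
  let bp : Option String :=
    match base_path_filter with
    | none => none
    | some b =>
      if b ≠ "" then some (if PySem.Str.endswith b "/" then b else b ++ "/") else none
  let root : PTrie :=
    (exclude_paths.getD []).foldl (fun t e => trieInsert t e.toList) (.node false .nil)
  files.foldl (fun out f =>
    if (match bp with | none => true | some b => PySem.Str.startswith f b)
        && !trieWalk root f.toList
    then out ++ [f] else out) []

-- ===== PRECONDITION & SPEC =====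
def Spec_apply_path_filters_py (files : List String) (base_path_filter : Option String) (exclude_paths : Option (List String)) (out : List String) : Prop := out = apply_path_filters_py_alt files base_path_filter exclude_paths
instance (files : List String) (base_path_filter : Option String) (exclude_paths : Option (List String)) (out : List String) : Decidable (Spec_apply_path_filters_py files base_path_filter exclude_paths out) := by unfold Spec_apply_path_filters_py; infer_instance

-- ===== CLAIM =====
def Claim_equal_apply_path_filters_py : Prop := ∀ (files : List String) (base_path_filter : Option String) (exclude_paths : Option (List String)), Dom_apply_path_filters_py files base_path_filter exclude_paths → Spec_apply_path_filters_py files base_path_filter exclude_paths (apply_path_filters_py files base_path_filter exclude_paths)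

-- ===== LEMMAS AND PROOFS =====

lemma childGet_childSet_self : ∀ (ch : PChildren) (c : Char) (t : PTrie),
    childGet (childSet ch c t) c = some t
  | .nil, c, t => by simp [childSet, childGet]
  | .cons c' t' rest, c, t => by
      by_cases h : c' = c
      · subst h; simp [childSet, childGet]
      · simp [childSet, childGet, h, childGet_childSet_self rest c t]

lemma childGet_childSet_ne : ∀ (ch : PChildren) (c x : Char) (t : PTrie), x ≠ c →
    childGet (childSet ch c t) x = childGet ch x
  | .nil, c, x, t, h => by simp [childSet, childGet, Ne.symm h]
  | .cons c' t' rest, c, x, t, h => by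
      by_cases h' : c' = c
      · subst h'; simp [childSet, childGet, Ne.symm h]
      · simp [childSet, childGet, h', childGet_childSet_ne rest c x t h]

lemma trieWalk_emptyNode (cs : List Char) : trieWalk (.node false .nil) cs = false := by
  cases cs <;> simp [trieWalk, childGet]

lemma trieWalk_true (ch : PChildren) (cs : List Char) : trieWalk (.node true ch) cs = true := by
  cases cs <;> simp [trieWalk]

lemma trieWalk_insert (w : List Char) : ∀ (t : PTrie) (cs : List Char),
    trieWalk (trieInsert t w) cs = (trieWalk t cs || w.isPrefixOf cs) := by
  induction w with
  | nil =>
    intro t cs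
    obtain ⟨b, ch⟩ := t
    simp [trieInsert, trieWalk_true, List.isPrefixOf]
  | cons c w' ih =>
    intro t cs
    obtain ⟨b, ch⟩ := t
    cases b with
    | true => simp [trieInsert, trieWalk_true]
    | false =>
      cases cs with
      | nil => simp [trieInsert, trieWalk, List.isPrefixOf]
      | cons c'' cs' =>
        by_cases h : c'' = c
        · subst h
          have hA : trieWalk (trieInsert (.node false ch) (c'' :: w')) (c'' :: cs')
              = trieWalk (trieInsert ((childGet ch c'').getD (.node false .nil)) w') cs' := by
            simp [trieInsert, trieWalk, childGet_childSet_self]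
          rw [hA, ih]
          have hB : trieWalk (PTrie.node false ch) (c'' :: cs')
              = trieWalk ((childGet ch c'').getD (.node false .nil)) cs' := by
            cases hg : childGet ch c'' <;> simp [trieWalk, hg, trieWalk_emptyNode]
          rw [hB]
          simp [List.isPrefixOf]
        · have h' : c ≠ c'' := Ne.symm h
          simp [trieInsert, trieWalk, childGet_childSet_ne ch c c'' _ h,
            List.isPrefixOf, h']

lemma trieWalk_build (l : List String) : ∀ (t : PTrie) (cs : List Char),
    trieWalk (l.foldl (fun t e => trieInsert t e.toList) t) cs
      = (trieWalk t cs || l.any (fun e => e.toList.isPrefixOf cs)) := by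
  induction l with
  | nil => simp
  | cons e rest ih =>
    intro t cs
    simp only [List.foldl_cons, ih, trieWalk_insert, List.any_cons]
    cases trieWalk t cs <;> cases hx : e.toList.isPrefixOf cs <;> simp

lemma isPrefixOf_eq_startswith (p cs : List Char) :
    p.isPrefixOf cs = PySem.Chars.startswith cs p := by
  rw [Bool.eq_iff_iff]
  simp [PySem.Chars.startswith_iff, List.isPrefixOf_iff_prefix]

lemma foldl_filter_eq (p : String → String → Bool) (l : List String) (res : List String) :
    l.foldl (fun acc e => acc.filter (fun f => !p f e)) res
      = res.filter (fun f => !(l.any (fun e => p f e))) := by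
  induction l generalizing res with
  | nil => simp
  | cons e t ih =>
    simp only [List.foldl_cons, ih, List.filter_filter, List.any_cons]
    apply List.filter_congr
    intro f _
    simp [Bool.and_comm]

-- B's output as one filter over files, with the trie walk replaced by its language
lemma alt_eq_filter (files : List String) (bpf : Option String) (eps : Option (List String)) :
    apply_path_filters_py_alt files bpf eps
      = files.filter (fun f =>
          (match bpf with
           | none => true
           | some b => if b ≠ "" then
               PySem.Str.startswith f (if PySem.Str.endswith b "/" then b else b ++ "/")
             else true)
          && !((eps.getD []).any (fun e => PySem.Str.startswith f e))) := by
  unfold apply_path_filters_py_alt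
  rw [PySem.List.foldl_append_if_eq_filter]
  simp only [List.nil_append]
  apply List.filter_congr
  intro f _
  cases bpf with
  | none =>
    simp [trieWalk_build, trieWalk_emptyNode, isPrefixOf_eq_startswith]
  | some b =>
    by_cases hb : b = "" <;>
      simp [hb, trieWalk_build, trieWalk_emptyNode, isPrefixOf_eq_startswith]

-- ===== VERDICT =====
theorem apply_path_filters_py_spec : Claim_equal_apply_path_filters_py := by
  intro files bpf eps _
  unfold Spec_apply_path_filters_py
  rw [alt_eq_filter]
  unfold apply_path_filters_py
  cases bpf with
  | none =>
    cases eps with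
    | none => simp
    | some l =>
      by_cases hl : l = []
      · simp [hl]
      · simp only [hl, ne_eq, not_false_iff, if_true, Option.getD]
        rw [foldl_filter_eq]
        simp
  | some b =>
    by_cases hb : b = ""
    · cases eps with
      | none => simp [hb]
      | some l =>
        by_cases hl : l = []
        · simp [hb, hl]
        · simp only [hb, hl, ne_eq, not_true_eq_false, if_false, not_false_iff, if_true,
            Option.getD]
          rw [foldl_filter_eq]
          simp
    · cases eps with
      | none => simp [hb]
      | some l =>
        by_cases hl : l = []
        · simp [hb, hl]
        · simp only [hb, hl, ne_eq, not_false_iff, if_true, Option.getD]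
          rw [foldl_filter_eq]
          simp only [List.filter_filter]
          apply List.filter_congr
          intro f _
          simp [Bool.and_comm]
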